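-- pv_equiv track=rewrite | github.com/daniel-tran/pixels2gpx | pixels2gpx.py | get_traversal_vectors
-- ===== SOURCE A (Python) =====
-- def get_traversal_vectors(magnitude):
--     """
--     Gets the coordinates relative to the centre that should be tested for valid traversal
--     Vectors are ordered such that the first coordinate is the immediate right and then follows clockwise
--
--     :param magnitude: The number of cells from the centre point to the rightmost cell
--     :type magnitude: int
--     :return: List of tuples representing the traversal vectors
--     :rtype: list
--     """
--     vectors = []
--     if magnitude > 0:
--         [vectors.append((magnitude, right_to_bottom_magnitude)) for right_to_bottom_magnitude in range(0, magnitude + 1)]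
--         [vectors.append((right_to_left_magnitude, magnitude))   for right_to_left_magnitude   in reversed(range(-magnitude + 1, magnitude))]
--         [vectors.append((-magnitude, left_to_top_magnitude))    for left_to_top_magnitude     in reversed(range(-magnitude, magnitude + 1))]
--         [vectors.append((top_to_right_magnitude, -magnitude))   for top_to_right_magnitude    in range(-magnitude + 1, magnitude + 1)]
--         [vectors.append((magnitude, right_to_start_magnitude))  for right_to_start_magnitude  in range(-magnitude + 1, 0)]
--     return vectors
-- ===== SOURCE B (Python) =====
-- def get_traversal_vectors(magnitude):
--     if magnitude <= 0:
--         return []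
--     m = magnitude
--
--     def point(i):
--         # closed-form coordinate of the i-th cell of the clockwise ring walk
--         if i <= m:
--             return (m, i)
--         if i <= 3 * m:
--             return (2 * m - i, m)
--         if i <= 5 * m:
--             return (-m, 4 * m - i)
--         if i <= 7 * m:
--             return (i - 6 * m, -m)
--         return (m, i - 8 * m)
--
--     return [point(i) for i in range(8 * m)]
-- ===== Notes on version B (the rewrite author's own statement) =====
-- stated objective: alternative
-- what changed: Replaces the five sequential range scans (one per ring side) with a single pass over range(8*m) that computes each cell's coordinates from its walk index by a closed-form piecewise formula.
import Mathlib
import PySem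

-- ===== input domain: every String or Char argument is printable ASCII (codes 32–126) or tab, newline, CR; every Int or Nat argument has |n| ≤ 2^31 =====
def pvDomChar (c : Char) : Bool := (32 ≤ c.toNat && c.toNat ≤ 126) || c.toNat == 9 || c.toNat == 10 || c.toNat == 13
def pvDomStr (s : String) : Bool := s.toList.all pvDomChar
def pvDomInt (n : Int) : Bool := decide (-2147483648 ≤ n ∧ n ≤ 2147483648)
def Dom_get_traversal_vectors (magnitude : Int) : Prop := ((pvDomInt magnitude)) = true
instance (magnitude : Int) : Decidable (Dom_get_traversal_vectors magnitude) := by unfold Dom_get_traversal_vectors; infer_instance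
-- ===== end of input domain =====

-- B replaces A's five sequential range scans with one pass computing each cell from its
-- walk index by a closed-form piecewise formula (objective: alternative, same cost).

-- ===== PORT A =====
def get_traversal_vectors (magnitude : Int) : List (Int × Int) :=
  if magnitude > 0 then
    ((PySem.List.pyRange 0 (magnitude + 1) 1).map (fun r => (magnitude, r))) ++
    (((PySem.List.pyRange (-magnitude + 1) magnitude 1).reverse).map (fun r => (r, magnitude))) ++
    (((PySem.List.pyRange (-magnitude) (magnitude + 1) 1).reverse).map (fun r => (-magnitude, r))) ++
    ((PySem.List.pyRange (-magnitude + 1) (magnitude + 1) 1).map (fun r => (r, -magnitude))) ++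
    ((PySem.List.pyRange (-magnitude + 1) 0 1).map (fun r => (magnitude, r)))
  else []

-- ===== PORT B =====
-- closed-form coordinate of the i-th cell of the clockwise ring walk (Source B's nested `point`)
def pvPoint (m i : Int) : Int × Int :=
  if i ≤ m then (m, i)
  else if i ≤ 3 * m then (2 * m - i, m)
  else if i ≤ 5 * m then (-m, 4 * m - i)
  else if i ≤ 7 * m then (i - 6 * m, -m)
  else (m, i - 8 * m)

def get_traversal_vectors_alt (magnitude : Int) : List (Int × Int) :=
  if magnitude ≤ 0 then []
  else (PySem.List.pyRange 0 (8 * magnitude) 1).map (pvPoint magnitude)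

-- ===== PRECONDITION & SPEC =====
def Spec_get_traversal_vectors (magnitude : Int) (out : List (Int × Int)) : Prop := out = get_traversal_vectors_alt magnitude
instance (magnitude : Int) (out : List (Int × Int)) : Decidable (Spec_get_traversal_vectors magnitude out) := by unfold Spec_get_traversal_vectors; infer_instance

-- ===== CLAIM (what is proved, stated in full; the proofs are below) =====
def Claim_equal_get_traversal_vectors : Prop := ∀ (magnitude : Int), Dom_get_traversal_vectors magnitude → Spec_get_traversal_vectors magnitude (get_traversal_vectors magnitude)

-- ===== LEMMAS AND PROOFS =====

-- each of B's index chunks reproduces the corresponding side list of A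
theorem pvChunk1 (m : Int) (_hm : 0 < m) :
    (PySem.List.pyRange 0 (m + 1) 1).map (pvPoint m)
      = (PySem.List.pyRange 0 (m + 1) 1).map (fun r => (m, r)) := by
  refine List.map_congr_left (fun i hi => ?_)
  rw [PySem.List.mem_pyRange_one] at hi
  simp only [pvPoint]
  split_ifs <;> simp only [Prod.mk.injEq, and_true, true_and] <;> omega

theorem pvChunk2 (m : Int) (hm : 0 < m) :
    (PySem.List.pyRange (m + 1) (3 * m) 1).map (pvPoint m)
      = ((PySem.List.pyRange (-m + 1) m 1).reverse).map (fun r => (r, m)) := by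
  have h : (PySem.List.pyRange (-m + 1) m 1).reverse = PySem.List.pyRange (m - 1) (-m) (-1) := by
    rw [PySem.List.pyRange_neg_one_eq_reverse]
    norm_num
  rw [h, PySem.List.pyRange_neg_one, PySem.List.pyRange_one, List.map_map, List.map_map]
  have hlen : (3 * m - (m + 1)).toNat = (m - 1 - -m).toNat := by omega
  rw [hlen]
  refine List.map_congr_left (fun k hk => ?_)
  rw [List.mem_range] at hk
  have hk' : (k : Int) < m - 1 - -m := by omega
  simp only [Function.comp, pvPoint]
  split_ifs <;> simp only [Prod.mk.injEq, and_true, true_and] <;> omega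

theorem pvChunk3 (m : Int) (hm : 0 < m) :
    (PySem.List.pyRange (3 * m) (5 * m + 1) 1).map (pvPoint m)
      = ((PySem.List.pyRange (-m) (m + 1) 1).reverse).map (fun r => (-m, r)) := by
  have h : (PySem.List.pyRange (-m) (m + 1) 1).reverse = PySem.List.pyRange m (-m - 1) (-1) := by
    rw [PySem.List.pyRange_neg_one_eq_reverse]
    norm_num
  rw [h, PySem.List.pyRange_neg_one, PySem.List.pyRange_one, List.map_map, List.map_map]
  have hlen : (5 * m + 1 - 3 * m).toNat = (m - (-m - 1)).toNat := by omega
  rw [hlen]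
  refine List.map_congr_left (fun k hk => ?_)
  rw [List.mem_range] at hk
  have hk' : (k : Int) < m - (-m - 1) := by omega
  simp only [Function.comp, pvPoint]
  split_ifs <;> simp only [Prod.mk.injEq, and_true, true_and] <;> omega

theorem pvChunk4 (m : Int) (hm : 0 < m) :
    (PySem.List.pyRange (5 * m + 1) (7 * m + 1) 1).map (pvPoint m)
      = (PySem.List.pyRange (-m + 1) (m + 1) 1).map (fun r => (r, -m)) := by
  rw [PySem.List.pyRange_one, PySem.List.pyRange_one, List.map_map, List.map_map]
  have hlen : (7 * m + 1 - (5 * m + 1)).toNat = (m + 1 - (-m + 1)).toNat := by omega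
  rw [hlen]
  refine List.map_congr_left (fun k hk => ?_)
  rw [List.mem_range] at hk
  have hk' : (k : Int) < m + 1 - (-m + 1) := by omega
  simp only [Function.comp, pvPoint]
  split_ifs <;> simp only [Prod.mk.injEq, and_true, true_and] <;> omega

theorem pvChunk5 (m : Int) (hm : 0 < m) :
    (PySem.List.pyRange (7 * m + 1) (8 * m) 1).map (pvPoint m)
      = (PySem.List.pyRange (-m + 1) 0 1).map (fun r => (m, r)) := by
  rw [PySem.List.pyRange_one, PySem.List.pyRange_one, List.map_map, List.map_map]
  have hlen : (8 * m - (7 * m + 1)).toNat = (0 - (-m + 1)).toNat := by omega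
  rw [hlen]
  refine List.map_congr_left (fun k hk => ?_)
  rw [List.mem_range] at hk
  have hk' : (k : Int) < 0 - (-m + 1) := by omega
  simp only [Function.comp, pvPoint]
  split_ifs <;> simp only [Prod.mk.injEq, and_true, true_and] <;> omega

theorem pvMain (m : Int) : get_traversal_vectors m = get_traversal_vectors_alt m := by
  by_cases hm : 0 < m
  · unfold get_traversal_vectors get_traversal_vectors_alt
    rw [if_pos hm, if_neg (by omega)]
    rw [PySem.List.pyRange_one_append 0 (m + 1) (8 * m) (by omega) (by omega),
        PySem.List.pyRange_one_append (m + 1) (3 * m) (8 * m) (by omega) (by omega),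
        PySem.List.pyRange_one_append (3 * m) (5 * m + 1) (8 * m) (by omega) (by omega),
        PySem.List.pyRange_one_append (5 * m + 1) (7 * m + 1) (8 * m) (by omega) (by omega)]
    simp only [List.map_append, List.append_assoc]
    rw [pvChunk1 m hm, pvChunk2 m hm, pvChunk3 m hm, pvChunk4 m hm, pvChunk5 m hm]
  · unfold get_traversal_vectors get_traversal_vectors_alt
    rw [if_neg hm, if_pos (by omega)]

-- ===== VERDICT (by name: the statement is the Claim_ definition above) =====
theorem get_traversal_vectors_spec : Claim_equal_get_traversal_vectors := by
  intro m _
  exact pvMain m
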